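-- pv_equiv track=rewrite | github.com/rectangletangle/iterlib | iterlib/__init__.py | truncated
-- ===== SOURCE A (Python) =====
-- import collections
--
-- def _amount_error(amount):
--     return ValueError('The amount <{}> must be <None> or an integer greater than -1.'.format(repr(amount)))
--
-- def truncated(iterable, amount):
--     """ Iterate over all but the last few items in an iterable. """
--
--     if amount is None:
--         for item in iterable:
--             yield item
--     elif amount < 0 or not isinstance(amount, int):
--         raise _amount_error(amount)
--     else:
--         queue   = collections.deque()
--         append  = queue.append
--         popleft = queue.popleft
--
--         for item in iterable:
--             append(item)
--
--             if len(queue) > amount: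
--                 yield popleft()
-- ===== SOURCE B (Python) =====
-- def truncated(iterable, amount):
--     """ Iterate over all but the last few items in an iterable. """
--     if amount is None:
--         yield from iterable
--     elif amount < 0 or not isinstance(amount, int):
--         raise ValueError('The amount <{}> must be <None> or an integer greater than -1.'.format(repr(amount)))
--     else:
--         items = list(iterable)
--         yield from items[:max(0, len(items) - amount)]
-- ===== Notes on version B (the rewrite author's own statement) =====
-- stated objective: simpler
-- what changed: Replaces the bounded deque sliding window with materializing the list and yielding the clamped slice items[:max(0, len-amount)].
import Mathlib
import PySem

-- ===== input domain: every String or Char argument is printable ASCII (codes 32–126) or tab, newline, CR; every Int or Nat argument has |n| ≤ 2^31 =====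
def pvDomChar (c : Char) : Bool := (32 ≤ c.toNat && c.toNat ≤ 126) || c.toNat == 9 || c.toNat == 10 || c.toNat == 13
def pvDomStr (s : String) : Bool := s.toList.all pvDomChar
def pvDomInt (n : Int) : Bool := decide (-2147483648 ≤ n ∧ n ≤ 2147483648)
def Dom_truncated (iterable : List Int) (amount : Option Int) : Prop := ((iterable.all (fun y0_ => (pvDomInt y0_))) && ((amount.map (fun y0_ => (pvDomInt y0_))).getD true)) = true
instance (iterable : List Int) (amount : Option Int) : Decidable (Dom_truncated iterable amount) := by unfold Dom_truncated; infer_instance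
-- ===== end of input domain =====

-- B replaces A's bounded-deque sliding window with a single clamped list slice (simpler; same O(n) cost).


-- ===== PORT A =====
-- the deque loop: queue q, output out; append item, pop-left and yield when len(queue) > amount
def truncatedLoop (k : Int) : List Int → List Int → List Int → List Int
  | [], _q, out => out
  | x :: xs, q, out =>
    let q' := q ++ [x]
    if (q'.length : Int) > k then truncatedLoop k xs q'.tail (out ++ [q'.headI])
    else truncatedLoop k xs q' out

def truncated (iterable : List Int) (amount : Option Int) : List Int :=
  match amount with
  | none => iterable
  | some a =>
    if a < 0 then []  -- Python raises ValueError here; excluded by Pre_truncated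
    else truncatedLoop a iterable [] []

-- ===== PORT B =====
def truncated_alt (iterable : List Int) (amount : Option Int) : List Int :=
  match amount with
  | none => iterable
  | some a =>
    if a < 0 then []  -- Python raises ValueError here; excluded by Pre_truncated
    else iterable.take (max 0 ((iterable.length : Int) - a)).toNat

-- ===== PRECONDITION & SPEC =====
-- A raises ValueError when amount is a negative integer; those inputs are excluded.
def Pre_truncated (iterable : List Int) (amount : Option Int) : Prop :=
  0 ≤ amount.getD 0
instance (iterable : List Int) (amount : Option Int) : Decidable (Pre_truncated iterable amount) := by unfold Pre_truncated; infer_instance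

def pvWitness_truncated : List Int × Option Int := ([1, 2, 3, 4], some 2)

def Spec_truncated (iterable : List Int) (amount : Option Int) (out : List Int) : Prop := out = truncated_alt iterable amount
instance (iterable : List Int) (amount : Option Int) (out : List Int) : Decidable (Spec_truncated iterable amount out) := by unfold Spec_truncated; infer_instance

-- ===== CLAIM (what is proved, stated in full; the proofs are below) =====
def Claim_equal_truncated : Prop := ∀ (iterable : List Int) (amount : Option Int), Dom_truncated iterable amount → Pre_truncated iterable amount → Spec_truncated iterable amount (truncated iterable amount)

-- ===== LEMMAS AND PROOFS =====
-- Invariant of A's loop: with queue q of length ≤ k, it appends the clamped window remainder to out.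
theorem truncatedLoop_eq (k : Int) (hk : 0 ≤ k) :
    ∀ (l q out : List Int), (q.length : Int) ≤ k →
      truncatedLoop k l q out = out ++ (q ++ l).take (q.length + l.length - k.toNat) := by
  intro l
  induction l with
  | nil =>
    intro q out hq
    simp [truncatedLoop]
    left; omega
  | cons x xs ih =>
    intro q out hq
    by_cases h : (q.length : Int) + 1 > k
    · -- queue full: q.length = k, pop-left and yield
      have hqk : q.length = k.toNat := by omega
      have hne : q ++ [x] ≠ [] := by simp
      obtain ⟨hd, tl, hqx⟩ := List.exists_cons_of_ne_nil hne
      have htl : tl.length = k.toNat := by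
        have := congrArg List.length hqx
        simp at this; omega
      have hlen : ((q ++ [x]).length : Int) > k := by simp; omega
      rw [truncatedLoop, if_pos (by simpa using hlen)]
      rw [hqx]
      simp only [List.tail_cons, List.headI]
      rw [ih tl (out ++ [hd]) (by omega)]
      have htake : (q ++ x :: xs).take (q.length + (x :: xs).length - k.toNat)
          = hd :: (tl ++ xs).take (tl.length + xs.length - k.toNat) := by
        have h1 : q ++ x :: xs = (hd :: tl) ++ xs := by rw [← hqx]; simp
        rw [h1]
        have h2 : q.length + (x :: xs).length - k.toNat = (tl.length + xs.length - k.toNat) + 1 := by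
          simp; omega
        rw [h2]
        simp
      rw [htake]
      simp
    · -- queue not full yet: just append
      have hlen : ¬ ((q ++ [x]).length : Int) > k := by simp; omega
      rw [truncatedLoop, if_neg (by simpa using hlen)]
      rw [ih (q ++ [x]) out (by simp; omega)]
      have : (q ++ [x]).length + xs.length - k.toNat = q.length + (x :: xs).length - k.toNat := by
        simp; omega
      rw [this]
      simp

-- ===== VERDICT (by name: the statement is the Claim_ definition above) =====
theorem truncated_spec : Claim_equal_truncated := by
  intro it amt _ hpre
  cases amt with
  | none => simp [Spec_truncated, truncated, truncated_alt]
  | some a =>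
    have ha : 0 ≤ a := by simpa [Pre_truncated] using hpre
    simp only [Spec_truncated, truncated, truncated_alt]
    rw [if_neg (by omega), if_neg (by omega)]
    rw [truncatedLoop_eq a ha it [] [] (by simpa using ha)]
    simp only [List.nil_append, List.length_nil, Nat.zero_add]
    congr 1
    omega
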